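-- pv_equiv track=rewrite | github.com/IgnacioMaqueda/Google-Code-Jam | 2021/Round1A/A-AppendSort.py | minimum_appends
-- ===== SOURCE A (Python) =====
-- def number_to_char(number):
--     return chr(number + ord('0'))
--
-- def char_to_number(char):
--     return ord(char) - ord('0')
--
-- def append_number(X_string, X_int, index, number):
--     X_string[index] = X_string[index] + number_to_char(number)
--     X_int[index] *= 10
--     X_int[index] += number
--     return 1
--
-- def append_zeros(X_string, X_int, index):
--     res = 0
--     while X_int[index] <= X_int[index - 1]:
--         res += append_number(X_string, X_int, index, 0)
--     return res
--
-- def minimum_appends(N, X_string, X_int):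
--     res = 0
--     for i in range(1, N):
--         if X_int[i] <= X_int[i - 1]:
--             if X_string[i - 1].startswith(X_string[i]) and X_string[i - 1] != X_string[i]:
--                 j = len(X_string[i - 1]) - 1
--                 while j >= len(X_string[i]) and X_string[i - 1][j] == '9':
--                     j -= 1
--                 if j >= len(X_string[i]):
--                     k = len(X_string[i])
--                     while k < j:
--                         res += append_number(X_string, X_int, i, char_to_number(X_string[i - 1][k]))
--                         k += 1
--                     res += append_number(X_string, X_int, i, char_to_number(X_string[i - 1][j]) + 1)
--             res += append_zeros(X_string, X_int, i)
--     return res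
-- ===== SOURCE B (Python) =====
-- # B: per-pair closed-form construction instead of one-digit-at-a-time appends.
-- # Mutates X_string and X_int in place exactly like A; equivalence claim is about the return value.
-- def _fixed_pair(prev_s, prev_n, cur_s, cur_n):
--     # smallest extension of cur reproducing A's construction, built in one go
--     s, n = cur_s, cur_n
--     if prev_s.startswith(s) and prev_s != s:
--         j = len(prev_s.rstrip('9')) - 1          # rightmost non-'9' position of prev
--         if j >= len(s):
--             chunk = prev_s[len(s):j] + chr(ord(prev_s[j]) + 1)
--             L = len(chunk)
--             s = s + chunk
--             n = n * 10 ** L + sum((ord(c) - 48) * 10 ** (L - 1 - k)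
--                                   for k, c in enumerate(chunk))
--     if n <= prev_n:
--         z = _digit_len(prev_n // n)              # minimal zeros so that n * 10**z > prev_n
--         s = s + '0' * z
--         n = n * 10 ** z
--     return s, n
--
-- def _digit_len(m):
--     z = 0
--     while m >= 1:
--         z += 1
--         m //= 10
--     return z
--
-- def minimum_appends(N, X_string, X_int):
--     res = 0
--     for i in range(1, N):
--         if X_int[i] <= X_int[i - 1]:
--             s, n = _fixed_pair(X_string[i - 1], X_int[i - 1], X_string[i], X_int[i])
--             res += len(s) - len(X_string[i])
--             X_string[i] = s
--             X_int[i] = n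
--     return res
-- ===== Notes on version B (the rewrite author's own statement) =====
-- stated objective: simpler
-- what changed: A grows X_string[i]/X_int[i] one appended digit at a time through three nested mutation loops (digit-copy loop, increment, repeated append-zero loop); B computes each repaired pair in one shot: it slices the copied chunk out of the previous string, values it with a power sum, gets the zero count from the digit length of prev//cur, builds the final string with one concatenation and derives the count as a length difference.
-- outside the precondition, e.g. on minimum_appends(2, ['2', '0'], [-3, 0]): A returns 0, B returns 0; on minimum_appends(2, ['**', '*'], [12, 3]): A returns 1, B returns 1
import Mathlib
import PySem

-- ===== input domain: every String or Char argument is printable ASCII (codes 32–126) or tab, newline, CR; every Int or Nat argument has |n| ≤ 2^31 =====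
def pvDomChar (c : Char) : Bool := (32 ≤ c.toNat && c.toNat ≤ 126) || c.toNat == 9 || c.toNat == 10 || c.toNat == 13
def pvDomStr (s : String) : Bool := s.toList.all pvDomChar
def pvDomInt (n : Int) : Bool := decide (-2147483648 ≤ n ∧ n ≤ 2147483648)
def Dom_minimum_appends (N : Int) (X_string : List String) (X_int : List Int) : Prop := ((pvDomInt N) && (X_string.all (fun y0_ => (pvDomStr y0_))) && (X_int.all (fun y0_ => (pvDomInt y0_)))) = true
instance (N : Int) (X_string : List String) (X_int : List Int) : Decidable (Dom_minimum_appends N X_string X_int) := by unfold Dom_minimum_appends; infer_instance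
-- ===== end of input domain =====

-- B replaces A's one-digit-at-a-time append loops by a per-pair closed-form construction
-- (chunk slice + power-sum value + digit-length zero count); equivalence is about the return
-- value only (the Python versions also mutate X_string/X_int, identically on Pre_-inputs).
-- Both ports handle strings as lists of code points (Char.toNat); ord/chr are exact there.


-- ===== PORT A =====
-- number_to_char(number) = chr(number + ord('0')), as a code point
def pvNumberToChar (n : Int) : Nat := (n + 48).toNat

-- char_to_number(char) = ord(char) - ord('0')
def pvCharToNumber (c : Nat) : Int := (c : Int) - 48

-- append_number acting on the local (string, int) cell of index i; returns the 1 it adds to res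
def pvAppendNumber (s : List Nat) (n : Int) (num : Int) : List Nat × Int × Int :=
  (s ++ [pvNumberToChar num], n * 10 + num, 1)

-- append_zeros: while X_int[i] <= X_int[i-1]: append 0.  The '1 ≤ n' conjunct is a totality
-- guard only (where it fails, the Python loop never terminates; such inputs are outside Pre_).
def pvAppendZeros (s : List Nat) (n : Int) (prev : Int) : List Nat × Int × Int :=
  if h : n ≤ prev ∧ 1 ≤ n then
    let r := pvAppendNumber s n 0
    let r2 := pvAppendZeros r.1 r.2.1 prev
    (r2.1, r2.2.1, r.2.2 + r2.2.2)
  else (s, n, 0)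
termination_by (prev - n + 1).toNat
decreasing_by obtain ⟨h1, h2⟩ := h; simp only [pvAppendNumber]; omega

-- the j-scan: while j >= len(cur) and prev[j] == '9': j -= 1
def pvScan9 (p : List Nat) (lenc : Nat) (j : Int) : Int :=
  if h : (lenc : Int) ≤ j ∧ PySem.List.pyGet? p j = some 57 then pvScan9 p lenc (j - 1)
  else j
termination_by (j + 1).toNat
decreasing_by omega

-- the k-copy loop: while k < j: append char_to_number(prev[k]); k += 1
def pvCopyLoop (p : List Nat) (s : List Nat) (n : Int) (k j : Int) : List Nat × Int × Int :=
  if h : k < j then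
    let r := pvAppendNumber s n (pvCharToNumber (PySem.List.pyGetD p k 0))
    let r2 := pvCopyLoop p r.1 r.2.1 (k + 1) j
    (r2.1, r2.2.1, r.2.2 + r2.2.2)
  else (s, n, 0)
termination_by (j - k).toNat
decreasing_by omega

-- body of A's for-loop for one index i, on the local cell values (writeback happens in pvStepA)
def pvPairA (prevS : List Nat) (prevN : Int) (curS : List Nat) (curN : Int) :
    List Nat × Int × Int :=
  let r1 :=
    if curS <+: prevS ∧ prevS ≠ curS then
      let j := pvScan9 prevS curS.length ((prevS.length : Int) - 1)
      if (curS.length : Int) ≤ j then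
        let r := pvCopyLoop prevS curS curN (curS.length : Int) j
        let r2 := pvAppendNumber r.1 r.2.1 (pvCharToNumber (PySem.List.pyGetD prevS j 0) + 1)
        (r2.1, r2.2.1, r.2.2 + r2.2.2)
      else (curS, curN, 0)
    else (curS, curN, 0)
  let r3 := pvAppendZeros r1.1 r1.2.1 prevN
  (r3.1, r3.2.1, r1.2.2 + r3.2.2)

def pvStepA (st : List (List Nat) × List Int × Int) (i : Int) : List (List Nat) × List Int × Int :=
  if PySem.List.pyGetD st.2.1 i 0 ≤ PySem.List.pyGetD st.2.1 (i - 1) 0 then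
    let r := pvPairA (PySem.List.pyGetD st.1 (i - 1) []) (PySem.List.pyGetD st.2.1 (i - 1) 0)
                     (PySem.List.pyGetD st.1 i []) (PySem.List.pyGetD st.2.1 i 0)
    (PySem.List.pySetD st.1 i r.1, PySem.List.pySetD st.2.1 i r.2.1, st.2.2 + r.2.2)
  else st

def minimum_appends (N : Int) (X_string : List String) (X_int : List Int) : Int :=
  ((PySem.List.pyRange 1 N 1).foldl pvStepA
    (X_string.map (fun s => s.toList.map Char.toNat), X_int, 0)).2.2

-- ===== PORT B =====
-- exact port of prev_s.rstrip('9') on code points ('9' = 57)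
def pvRstrip9 (p : List Nat) : List Nat := (p.reverse.dropWhile (· == 57)).reverse

-- _digit_len(m): while m >= 1: z += 1; m //= 10  (a count, hence Nat)
def pvDigitLen (m : Int) : Nat :=
  if h : 1 ≤ m then pvDigitLen (PySem.Int.floordiv m 10) + 1 else 0
termination_by m.toNat
decreasing_by
  rw [PySem.Int.floordiv_eq_ediv_of_pos (by norm_num)]
  omega

-- _fixed_pair(prev_s, prev_n, cur_s, cur_n) on code points
def pvFixedPair (prevS : List Nat) (prevN : Int) (curS : List Nat) (curN : Int) :
    List Nat × Int :=
  let sn :=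
    if curS <+: prevS ∧ prevS ≠ curS then
      let j : Int := ((pvRstrip9 prevS).length : Int) - 1
      if (curS.length : Int) ≤ j then
        let chunk := PySem.List.slice prevS (some (curS.length : Int)) (some j) ++
                     [PySem.List.pyGetD prevS j 0 + 1]
        let L := chunk.length
        (curS ++ chunk,
         curN * 10 ^ L +
           ((PySem.List.enumerate chunk 0).map
             (fun kc => ((kc.2 : Int) - 48) * 10 ^ (L - 1 - kc.1.toNat))).sum)
      else (curS, curN)
    else (curS, curN)
  if sn.2 ≤ prevN then
    let z := pvDigitLen (PySem.Int.floordiv prevN sn.2)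
    (sn.1 ++ List.replicate z 48, sn.2 * 10 ^ z)
  else sn

def pvStepB (st : List (List Nat) × List Int × Int) (i : Int) : List (List Nat) × List Int × Int :=
  if PySem.List.pyGetD st.2.1 i 0 ≤ PySem.List.pyGetD st.2.1 (i - 1) 0 then
    let sn := pvFixedPair (PySem.List.pyGetD st.1 (i - 1) []) (PySem.List.pyGetD st.2.1 (i - 1) 0)
                          (PySem.List.pyGetD st.1 i []) (PySem.List.pyGetD st.2.1 i 0)
    (PySem.List.pySetD st.1 i sn.1, PySem.List.pySetD st.2.1 i sn.2,
     st.2.2 + ((sn.1.length : Int) - ((PySem.List.pyGetD st.1 i []).length : Int)))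
  else st

def minimum_appends_alt (N : Int) (X_string : List String) (X_int : List Int) : Int :=
  ((PySem.List.pyRange 1 N 1).foldl pvStepB
    (X_string.map (fun s => s.toList.map Char.toNat), X_int, 0)).2.2

-- ===== PRECONDITION & SPEC =====
-- Pre_ excludes (a) N beyond the list lengths, where A raises IndexError, and (b) inputs on
-- which append_zeros can loop forever (a nonpositive running value), via the sufficient
-- closed-form conditions 'X_int[1:N] positive' and 'no character below '0' in X_string[:N]';
-- on excluded inputs where A does terminate, B returns the very same value (see cites).
def Pre_minimum_appends (N : Int) (X_string : List String) (X_int : List Int) : Prop :=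
  N ≤ (X_string.length : Int) ∧ N ≤ (X_int.length : Int) ∧
  ((X_int.take N.toNat).drop 1).all (fun n => decide (1 ≤ n)) = true ∧
  (X_string.take N.toNat).all (fun s => s.toList.all (fun c => decide (48 ≤ c.toNat))) = true
instance (N : Int) (X_string : List String) (X_int : List Int) :
    Decidable (Pre_minimum_appends N X_string X_int) := by
  unfold Pre_minimum_appends; infer_instance

def pvWitness_minimum_appends : Int × List String × List Int := (2, ["1", "1"], [1, 1])

def Spec_minimum_appends (N : Int) (X_string : List String) (X_int : List Int) (out : Int) : Prop := out = minimum_appends_alt N X_string X_int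
instance (N : Int) (X_string : List String) (X_int : List Int) (out : Int) : Decidable (Spec_minimum_appends N X_string X_int out) := by unfold Spec_minimum_appends; infer_instance

-- ===== CLAIM (what is proved, stated in full; the proofs are below) =====
def Claim_equal_minimum_appends : Prop := ∀ (N : Int) (X_string : List String) (X_int : List Int), Dom_minimum_appends N X_string X_int → Pre_minimum_appends N X_string X_int → Spec_minimum_appends N X_string X_int (minimum_appends N X_string X_int)

-- ===== LEMMAS AND PROOFS =====

lemma pvDigitLen_succ (m : Int) (hm : 1 ≤ m) :
    pvDigitLen m = pvDigitLen (PySem.Int.floordiv m 10) + 1 := by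
  rw [pvDigitLen]; simp [hm]

lemma pvFloordiv_ten (prev n : Int) (hn : 1 ≤ n) :
    PySem.Int.floordiv (PySem.Int.floordiv prev n) 10 = PySem.Int.floordiv prev (n * 10) := by
  rw [PySem.Int.floordiv_eq_ediv_of_pos (b := (10:Int)) (by norm_num),
      PySem.Int.floordiv_eq_ediv_of_pos (b := n) (by omega),
      PySem.Int.floordiv_eq_ediv_of_pos (b := n * 10) (by omega)]
  exact Int.ediv_ediv_of_nonneg (by omega)

lemma pvAppendZeros_spec (s : List Nat) (n prev : Int) (hn : 1 ≤ n) :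
    pvAppendZeros s n prev =
      if n ≤ prev then
        (s ++ List.replicate (pvDigitLen (PySem.Int.floordiv prev n)) 48,
         n * 10 ^ (pvDigitLen (PySem.Int.floordiv prev n)),
         (pvDigitLen (PySem.Int.floordiv prev n) : Int))
      else (s, n, 0) := by
  rw [pvAppendZeros]
  by_cases hle : n ≤ prev
  · have h48 : pvNumberToChar 0 = 48 := by decide
    have hrec := pvAppendZeros_spec (s ++ [48]) (n * 10) prev (by omega)
    have hq1 : 1 ≤ PySem.Int.floordiv prev n := by
      rw [PySem.Int.floordiv_eq_ediv_of_pos (by omega), Int.le_ediv_iff_mul_le (by omega)]; omega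
    have hstep : pvDigitLen (PySem.Int.floordiv prev n)
        = pvDigitLen (PySem.Int.floordiv prev (n * 10)) + 1 := by
      rw [pvDigitLen_succ _ hq1, pvFloordiv_ten prev n hn]
    simp only [pvAppendNumber, dif_pos (And.intro hle hn), h48, add_zero, hrec, hstep, if_pos hle]
    by_cases hle10 : n * 10 ≤ prev
    · simp only [if_pos hle10, Prod.mk.injEq]
      refine ⟨?_, ?_, by push_cast; ring⟩
      · rw [List.replicate_succ]; simp
      · rw [pow_succ]; ring
    · have hz : PySem.Int.floordiv prev (n * 10) = 0 := by
        rw [PySem.Int.floordiv_eq_ediv_of_pos (by omega)]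
        exact Int.ediv_eq_zero_of_lt (by omega) (by omega)
      have hz0 : pvDigitLen (PySem.Int.floordiv prev (n * 10)) = 0 := by
        rw [hz, pvDigitLen]; simp
      simp only [if_neg hle10, hz0, Prod.mk.injEq]
      norm_num
  · simp [hle]
termination_by (prev - n + 1).toNat
decreasing_by omega

lemma pvRoundtrip (c : Nat) : pvNumberToChar (pvCharToNumber c) = c := by
  simp [pvNumberToChar, pvCharToNumber]

lemma pvCopyLoop_spec (p : List Nat) (s : List Nat) (n : Int) (k j : Int)
    (hk : 0 ≤ k) (hkj : k ≤ j) (hj : j ≤ (p.length : Int)) :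
    pvCopyLoop p s n k j =
      (s ++ (p.drop k.toNat).take (j - k).toNat,
       List.foldl (fun a ch => a * 10 + pvCharToNumber ch) n ((p.drop k.toNat).take (j - k).toNat),
       j - k) := by
  rw [pvCopyLoop]
  by_cases hlt : k < j
  · have hklen : k.toNat < p.length := by omega
    have hget : PySem.List.pyGetD p k 0 = p[k.toNat] :=
      PySem.List.pyGetD_eq_getElem p 0 hk (by omega)
    have hdrop : p.drop k.toNat = p[k.toNat] :: p.drop (k.toNat + 1) :=
      List.drop_eq_getElem_cons hklen
    have htake : (p.drop k.toNat).take (j - k).toNat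
        = p[k.toNat] :: (p.drop (k + 1).toNat).take (j - (k + 1)).toNat := by
      rw [hdrop]
      have h1 : (j - k).toNat = (j - (k + 1)).toNat + 1 := by omega
      have h2 : (k + 1).toNat = k.toNat + 1 := by omega
      rw [h1, h2, List.take_succ_cons]
    have hrec := pvCopyLoop_spec p (s ++ [pvNumberToChar (pvCharToNumber p[k.toNat])])
        (n * 10 + pvCharToNumber p[k.toNat]) (k + 1) j (by omega) (by omega) hj
    rw [pvRoundtrip] at hrec
    simp only [dif_pos hlt, pvAppendNumber, hget, pvRoundtrip, hrec, htake, List.foldl_cons,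
      Prod.mk.injEq]
    exact ⟨by simp, trivial, by omega⟩
  · have hkj' : k = j := le_antisymm hkj (by omega)
    rw [dif_neg hlt]
    subst hkj'
    simp
termination_by (j - k).toNat
decreasing_by omega

lemma pvEnumerate_append (xs ys : List Nat) (s : Int) :
    PySem.List.enumerate (xs ++ ys) s
      = PySem.List.enumerate xs s ++ PySem.List.enumerate ys (s + xs.length) := by
  induction xs generalizing s with
  | nil => simp [PySem.List.enumerate_nil]
  | cons x xs ih =>
      simp only [List.cons_append, PySem.List.enumerate_cons, ih, List.length_cons]
      have h1 : s + 1 + (xs.length : Int) = s + (1 + (xs.length : Int)) := by ring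
      have h2 : ((xs.length + 1 : Nat) : Int) = 1 + (xs.length : Int) := by push_cast; ring
      rw [h1, h2]

lemma pvEnumerate_fst_lt (c : List Nat) (s : Int) :
    ∀ kc ∈ PySem.List.enumerate c s, s ≤ kc.1 ∧ kc.1 < s + c.length := by
  induction c generalizing s with
  | nil => simp [PySem.List.enumerate_nil]
  | cons x xs ih =>
      intro kc hkc
      rw [PySem.List.enumerate_cons, List.mem_cons] at hkc
      rcases hkc with h | h
      · subst h; simp
      · have := ih (s + 1) kc h
        simp only [List.length_cons]
        push_cast at this ⊢
        omega

lemma pvHorner (c : List Nat) (n : Int) :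
    List.foldl (fun a ch => a * 10 + pvCharToNumber ch) n c
      = n * 10 ^ c.length +
        ((PySem.List.enumerate c 0).map
          (fun kc => ((kc.2 : Int) - 48) * 10 ^ (c.length - 1 - kc.1.toNat))).sum := by
  induction c using List.reverseRecOn with
  | nil => simp [PySem.List.enumerate_nil]
  | append_singleton c x ih =>
      rw [List.foldl_append, List.foldl_cons, List.foldl_nil, ih, pvEnumerate_append]
      simp only [List.length_append, List.length_singleton, List.map_append, List.sum_append,
        PySem.List.enumerate_cons, PySem.List.enumerate_nil, List.map_cons, List.map_nil,
        List.sum_cons, List.sum_nil, add_zero, zero_add]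
      have hmap : ((PySem.List.enumerate c 0).map
            (fun kc => ((kc.2 : Int) - 48) * 10 ^ (c.length + 1 - 1 - kc.1.toNat)))
          = ((PySem.List.enumerate c 0).map
            (fun kc => 10 * (((kc.2 : Int) - 48) * 10 ^ (c.length - 1 - kc.1.toNat)))) := by
        apply List.map_congr_left
        intro kc hkc
        have hb := pvEnumerate_fst_lt c 0 kc hkc
        have he : c.length + 1 - 1 - kc.1.toNat = (c.length - 1 - kc.1.toNat) + 1 := by omega
        rw [he, pow_succ]; ring
      rw [hmap, List.sum_map_mul_left]
      rw [Int.toNat_natCast]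
      simp only [Nat.add_sub_cancel, Nat.sub_self, pow_zero, pvCharToNumber]
      ring

lemma pvGetSome (p : List Nat) (j : Int) (h0 : 0 ≤ j) (h1 : j < (p.length : Int)) :
    PySem.List.pyGet? p j = some p[j.toNat] := by
  obtain ⟨n, rfl⟩ : ∃ n : Nat, j = (n : Int) := ⟨j.toNat, by omega⟩
  rw [PySem.List.pyGet?_natCast p n]
  simp only [Int.toNat_natCast]
  exact List.getElem?_eq_getElem (by exact_mod_cast h1)

lemma pvScan9_find (p : List Nat) (lenc jB : Nat) (hjB : lenc ≤ jB) (hjBlen : jB < p.length)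
    (hne : p[jB] ≠ 57) :
    ∀ (j : Int), (jB : Int) ≤ j → j < (p.length : Int) →
      (∀ k : Nat, jB < k → (k : Int) ≤ j → (h : k < p.length) → p[k] = 57) →
      pvScan9 p lenc j = jB := by
  intro j hj1 hj2 hall
  rw [pvScan9]
  by_cases hjeq : j = (jB : Int)
  · subst hjeq
    rw [dif_neg]
    rintro ⟨-, hg⟩
    rw [pvGetSome p _ (by omega) hj2] at hg
    simp only [Option.some.injEq] at hg
    exact hne (by simpa using hg)
  · have hlt : (jB : Int) < j := by omega
    have h9 : p[j.toNat] = 57 := hall j.toNat (by omega) (by omega) (by omega)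
    rw [dif_pos ⟨by omega, by rw [pvGetSome p j (by omega) hj2, h9]⟩]
    exact pvScan9_find p lenc jB hjB hjBlen hne (j - 1) (by omega) (by omega)
      (fun k hk1 hk2 hk3 => hall k hk1 (by omega) hk3)
termination_by j => (j - jB).toNat
decreasing_by omega

lemma pvScan9_all9 (p : List Nat) (lenc : Nat) :
    ∀ (j : Int), j < (p.length : Int) →
      (∀ k : Nat, lenc ≤ k → (k : Int) ≤ j → (h : k < p.length) → p[k] = 57) →
      pvScan9 p lenc j < (lenc : Int) := by
  intro j hj hall
  rw [pvScan9]
  by_cases hge : (lenc : Int) ≤ j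
  · have h9 : p[j.toNat] = 57 := hall j.toNat (by omega) (by omega) (by omega)
    rw [dif_pos ⟨hge, by rw [pvGetSome p j (by omega) hj, h9]⟩]
    exact pvScan9_all9 p lenc (j - 1) (by omega)
      (fun k hk1 hk2 hk3 => hall k hk1 (by omega) hk3)
  · rw [dif_neg (by rintro ⟨h, -⟩; exact hge h)]
    omega
termination_by j => (j + 1).toNat
decreasing_by omega

lemma pvRstrip9_decomp (p : List Nat) :
    p = pvRstrip9 p ++ (p.reverse.takeWhile (· == 57)).reverse ∧
    (∀ c ∈ p.reverse.takeWhile (· == 57), c = 57) := by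
  constructor
  · conv_lhs => rw [← List.reverse_reverse p, ← List.takeWhile_append_dropWhile (p := (· == 57)) (l := p.reverse)]
    rw [List.reverse_append]
    rfl
  · intro c hc
    have := List.mem_takeWhile_imp hc
    simpa using this

lemma pvScan9_rstrip (p : List Nat) (lenc : Nat) :
    ((lenc : Int) ≤ pvScan9 p lenc ((p.length : Int) - 1) ↔
      (lenc : Int) ≤ ((pvRstrip9 p).length : Int) - 1) ∧
    ((lenc : Int) ≤ ((pvRstrip9 p).length : Int) - 1 →
      pvScan9 p lenc ((p.length : Int) - 1) = ((pvRstrip9 p).length : Int) - 1) := by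
  obtain ⟨hdecomp, hnines⟩ := pvRstrip9_decomp p
  set d := pvRstrip9 p with hd
  set t := (p.reverse.takeWhile (· == 57)).reverse with ht
  have hlen : p.length = d.length + t.length := by
    conv_lhs => rw [hdecomp]
    simp [ht]
  have hall9 : ∀ k : Nat, d.length ≤ k → (h : k < p.length) → p[k] = 57 := by
    intro k hk h
    have h2 : k < (d ++ t).length := by rw [← hdecomp]; exact h
    have heq : p[k] = (d ++ t)[k]'h2 := by congr 1
    rw [heq, List.getElem_append_right (by omega)]
    have hm : t[k - d.length]'(by simp at h2 ⊢; omega) ∈ t := List.getElem_mem _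
    exact hnines _ (by rw [← List.mem_reverse]; exact hm)
  by_cases hcase : lenc < d.length
  · -- the scan stops at index d.length - 1, the rightmost non-'9'
    have hdw : p.reverse.dropWhile (· == 57) ≠ [] := by
      intro h
      have : d = [] := by rw [hd]; unfold pvRstrip9; rw [h]; rfl
      rw [this] at hcase; simp at hcase
    have hrev : d.reverse = p.reverse.dropWhile (· == 57) := by
      rw [hd]; unfold pvRstrip9; rw [List.reverse_reverse]
    have hne' : d.reverse ≠ [] := by rw [hrev]; exact hdw
    have hhead : d.reverse.head hne' = (p.reverse.dropWhile (· == 57)).head hdw := by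
      congr 1
    have h57 : d.reverse.head hne' ≠ 57 := by
      rw [hhead]
      have := List.head_dropWhile_not (· == 57) hdw
      simpa using this
    have hlast : p[d.length - 1]'(by omega) ≠ 57 := by
      have h2 : d.length - 1 < (d ++ t).length := by simp; omega
      have he : p[d.length - 1]'(by omega) = (d ++ t)[d.length - 1]'h2 := by congr 1
      rw [he, List.getElem_append_left (by omega)]
      have h0 : d.reverse[0]'(by simp; omega) = d[d.length - 1]'(by omega) := by
        rw [List.getElem_reverse]
        simp
      rw [← h0, ← List.head_eq_getElem]
      exact h57
    have hfind := pvScan9_find p lenc (d.length - 1) (by omega) (by omega) hlast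
      ((p.length : Int) - 1) (by omega) (by omega)
      (fun k hk1 hk2 hk3 => hall9 k (by omega) hk3)
    rw [hfind]
    constructor
    · constructor <;> (intro h; omega)
    · intro h; omega
  · -- everything at or after lenc is a '9'; the scan drops below lenc
    have hscan := pvScan9_all9 p lenc ((p.length : Int) - 1) (by omega)
      (fun k hk1 hk2 hk3 => hall9 k (by omega) hk3)
    constructor
    · constructor
      · intro h; omega
      · intro h; omega
    · intro h; omega

lemma pvFoldPos (c : List Nat) : ∀ (a : Int), 1 ≤ a → (∀ ch ∈ c, 48 ≤ ch) →
    1 ≤ List.foldl (fun a ch => a * 10 + pvCharToNumber ch) a c := by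
  induction c with
  | nil => intro a ha _; simpa using ha
  | cons x xs ih =>
      intro a ha hc
      rw [List.foldl_cons]
      refine ih _ ?_ (fun ch hch => hc ch (List.mem_cons_of_mem _ hch))
      have : (48 : Int) ≤ x := by exact_mod_cast hc x List.mem_cons_self
      simp only [pvCharToNumber]
      omega

lemma pvIncChar (x : Nat) : pvNumberToChar (pvCharToNumber x + 1) = x + 1 := by
  simp [pvNumberToChar, pvCharToNumber]
  omega

lemma pvPair_main (prevS curS : List Nat) (prevN curN : Int)
    (hcur : 1 ≤ curN) (hprev : ∀ c ∈ prevS, 48 ≤ c) :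
    pvPairA prevS prevN curS curN
      = ((pvFixedPair prevS prevN curS curN).1,
         (pvFixedPair prevS prevN curS curN).2,
         ((pvFixedPair prevS prevN curS curN).1.length : Int) - (curS.length : Int)) ∧
    1 ≤ (pvFixedPair prevS prevN curS curN).2 ∧
    (∀ c ∈ (pvFixedPair prevS prevN curS curN).1, c ∈ curS ∨ 48 ≤ c) := by
  obtain ⟨hiff, heq⟩ := pvScan9_rstrip prevS curS.length
  by_cases hpre : curS <+: prevS ∧ prevS ≠ curS
  case neg =>
    -- no prefix work on either side; only the zero-append tail
    simp only [pvPairA, pvFixedPair, if_neg hpre]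
    rw [pvAppendZeros_spec _ _ _ hcur]
    by_cases hle : curN ≤ prevN
    · simp only [if_pos hle, Prod.mk.injEq]
      refine ⟨by simp; try omega, ?_, ?_⟩
      · have : (1:Int) ≤ 10 ^ pvDigitLen (PySem.Int.floordiv prevN curN) := one_le_pow₀ (by norm_num)
        nlinarith
      · intro c hc
        rcases List.mem_append.mp hc with h | h
        · exact Or.inl h
        · right; have := List.eq_of_mem_replicate h; omega
    · simp only [if_neg hle, Prod.mk.injEq]
      exact ⟨by simp, hcur, fun c hc => Or.inl hc⟩
  case pos =>
    simp only [pvPairA, pvFixedPair, if_pos hpre]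
    by_cases hj : (curS.length : Int) ≤ ((pvRstrip9 prevS).length : Int) - 1
    · -- chunk is copied on both sides
      have hjA := heq hj
      have hdlen : (pvRstrip9 prevS).length ≤ prevS.length := by
        unfold pvRstrip9
        have := List.length_dropWhile_le (fun x => x == 57) prevS.reverse
        simpa using this
      set j : Int := ((pvRstrip9 prevS).length : Int) - 1 with hjdef
      have hjlen : j < (prevS.length : Int) := by omega
      have hj0 : 0 ≤ j := by omega
      have hgetj : PySem.List.pyGetD prevS j 0 = prevS[j.toNat] :=
        PySem.List.pyGetD_eq_getElem prevS 0 hj0 hjlen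
      have hxmem : prevS[j.toNat] ∈ prevS := List.getElem_mem _
      set x := prevS[j.toNat] with hxdef
      have hcopy := pvCopyLoop_spec prevS curS curN (curS.length : Int) j
        (by omega) (by omega) (by omega)
      set c := (prevS.drop ((curS.length : Int)).toNat).take (j - (curS.length : Int)).toNat
        with hcdef
      have hslice : PySem.List.slice prevS (some (curS.length : Int)) (some j) = c := by
        rw [PySem.List.slice_toNat prevS (by omega) hj0, hcdef]
        congr 1
        omega
      rw [if_pos (hiff.mpr hj), hjA, if_pos hj]
      simp only [hcopy, pvAppendNumber, hgetj, pvIncChar, hslice]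
      -- chunk on the B side
      set chunk := c ++ [x + 1] with hchunkdef
      have hcc : ∀ ch ∈ chunk, 48 ≤ ch := by
        intro ch hch
        rcases List.mem_append.mp hch with h | h
        · exact hprev ch (List.mem_of_mem_drop (List.mem_of_mem_take h))
        · have : ch = x + 1 := by simpa using h
          have : 48 ≤ x := hprev x hxmem
          omega
      have hfold : List.foldl (fun a ch => a * 10 + pvCharToNumber ch) curN c * 10 +
            (pvCharToNumber x + 1)
          = List.foldl (fun a ch => a * 10 + pvCharToNumber ch) curN chunk := by
        rw [hchunkdef, List.foldl_append, List.foldl_cons, List.foldl_nil]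
        simp only [pvCharToNumber]
        push_cast
        ring
      have hn1 : 1 ≤ List.foldl (fun a ch => a * 10 + pvCharToNumber ch) curN chunk :=
        pvFoldPos chunk curN hcur hcc
      have hhorner := pvHorner chunk curN
      rw [hfold, pvAppendZeros_spec _ _ _ hn1, ← hhorner]
      set n1 := List.foldl (fun a ch => a * 10 + pvCharToNumber ch) curN chunk with hn1def
      have hclen : (j - (curS.length : Int)).toNat + 1 = chunk.length := by
        rw [hchunkdef]
        simp [hcdef]
        omega
      have hassoc : curS ++ c ++ [x + 1] = curS ++ chunk := by
        rw [hchunkdef, List.append_assoc]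
      have hpow : (1:Int) ≤ 10 ^ pvDigitLen (PySem.Int.floordiv prevN n1) :=
        one_le_pow₀ (by norm_num)
      have hchars : ∀ ch ∈ curS ++ chunk, ch ∈ curS ∨ 48 ≤ ch := by
        intro ch hch
        rcases List.mem_append.mp hch with h | h
        · exact Or.inl h
        · exact Or.inr (hcc ch h)
      by_cases hle : n1 ≤ prevN
      · simp only [if_pos hle, hassoc, Prod.mk.injEq]
        refine ⟨?_, by nlinarith, ?_⟩
        · refine ⟨trivial, trivial, ?_⟩
          simp only [List.length_append, List.length_replicate]
          push_cast
          omega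
        · intro ch hch
          rcases List.mem_append.mp hch with h | h
          · exact hchars ch h
          · right; have := List.eq_of_mem_replicate h; omega
      · simp only [if_neg hle, hassoc, Prod.mk.injEq]
        refine ⟨⟨trivial, trivial, ?_⟩, hn1, hchars⟩
        simp only [List.length_append]
        push_cast
        omega
    · -- no chunk: the scan finds only '9's (or stops below len(cur))
      rw [if_neg (fun hcon => hj (hiff.mp hcon)), if_neg hj]
      rw [pvAppendZeros_spec _ _ _ hcur]
      by_cases hle : curN ≤ prevN
      · simp only [if_pos hle, Prod.mk.injEq]
        refine ⟨by simp; try omega, ?_, ?_⟩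
        · have : (1:Int) ≤ 10 ^ pvDigitLen (PySem.Int.floordiv prevN curN) := one_le_pow₀ (by norm_num)
          nlinarith
        · intro c hc
          rcases List.mem_append.mp hc with h | h
          · exact Or.inl h
          · right; have := List.eq_of_mem_replicate h; omega
      · simp only [if_neg hle, Prod.mk.injEq]
        exact ⟨by simp, hcur, fun c hc => Or.inl hc⟩

lemma pvStep_main (N i : Int) (Xs : List (List Nat)) (Xi : List Int) (res : Int)
    (h1 : 1 ≤ i) (h2 : i < N) (hXs : N ≤ (Xs.length : Int)) (hXi : N ≤ (Xi.length : Int))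
    (hchars : ∀ k : Nat, (k : Int) < N → ∀ c ∈ Xs.getD k [], 48 ≤ c)
    (hposAll : ∀ k : Nat, i ≤ (k : Int) → (k : Int) < N → 1 ≤ Xi.getD k 0) :
    pvStepA (Xs, Xi, res) i = pvStepB (Xs, Xi, res) i ∧
    (pvStepA (Xs, Xi, res) i).1.length = Xs.length ∧
    (pvStepA (Xs, Xi, res) i).2.1.length = Xi.length ∧
    (∀ k : Nat, (k : Int) < N → ∀ c ∈ (pvStepA (Xs, Xi, res) i).1.getD k [], 48 ≤ c) ∧
    (∀ k : Nat, i + 1 ≤ (k : Int) → (k : Int) < N → 1 ≤ (pvStepA (Xs, Xi, res) i).2.1.getD k 0) := by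
  have hilen : i.toNat < Xi.length := by omega
  have hslen : i.toNat < Xs.length := by omega
  by_cases hcond : PySem.List.pyGetD Xi i 0 ≤ PySem.List.pyGetD Xi (i - 1) 0
  case neg =>
    simp only [pvStepA, pvStepB, if_neg hcond]
    exact ⟨trivial, trivial, trivial, hchars, fun k hk1 hk2 => hposAll k (by omega) hk2⟩
  case pos =>
    have hgetXi : PySem.List.pyGetD Xi i 0 = Xi.getD i.toNat 0 := by
      rw [PySem.List.pyGetD_eq_getElem Xi 0 (by omega) (by omega), List.getD_eq_getElem Xi 0 hilen]
    have hgetXs : PySem.List.pyGetD Xs i [] = Xs.getD i.toNat [] := by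
      rw [PySem.List.pyGetD_eq_getElem Xs [] (by omega) (by omega), List.getD_eq_getElem Xs [] hslen]
    have hgetXs' : PySem.List.pyGetD Xs (i - 1) [] = Xs.getD (i - 1).toNat [] := by
      rw [PySem.List.pyGetD_eq_getElem Xs [] (by omega) (by omega),
          List.getD_eq_getElem Xs [] (by omega)]
    have hcur : 1 ≤ PySem.List.pyGetD Xi i 0 := by
      rw [hgetXi]; exact hposAll i.toNat (by omega) (by omega)
    have hprev : ∀ c ∈ PySem.List.pyGetD Xs (i - 1) [], 48 ≤ c := by
      rw [hgetXs']; exact hchars (i - 1).toNat (by omega)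
    obtain ⟨hpair, hpos1, hcharsNew⟩ :=
      pvPair_main (PySem.List.pyGetD Xs (i - 1) []) (PySem.List.pyGetD Xs i [])
        (PySem.List.pyGetD Xi (i - 1) 0) (PySem.List.pyGetD Xi i 0) hcur hprev
    simp only [pvStepA, pvStepB, if_pos hcond, hpair]
    refine ⟨trivial, by simp [PySem.List.length_pySetD], by simp [PySem.List.length_pySetD], ?_, ?_⟩
    · intro k hk c hc
      rw [PySem.List.pySetD_of_nonneg Xs _ (by omega)] at hc
      have hklen : k < Xs.length := by omega
      rw [List.getD_eq_getElem _ _ (by simpa using hklen), List.getElem_set] at hc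
      by_cases hki : i.toNat = k
      · rw [if_pos hki] at hc
        rcases hcharsNew c hc with h | h
        · subst hki
          rw [hgetXs] at h
          exact hchars i.toNat (by omega) c h
        · exact h
      · rw [if_neg hki] at hc
        exact hchars k hk c (by rwa [List.getD_eq_getElem _ _ hklen])
    · intro k hk1 hk2
      rw [PySem.List.pySetD_of_nonneg Xi _ (by omega)]
      have hklen : k < Xi.length := by omega
      rw [List.getD_eq_getElem _ _ (by simpa using hklen), List.getElem_set, if_neg (by omega)]
      have := hposAll k (by omega) hk2
      rwa [List.getD_eq_getElem _ _ hklen] at this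

lemma pvLoop (N : Int) : ∀ (m : Nat) (i : Int) (Xs : List (List Nat)) (Xi : List Int) (res : Int),
    m = (N - i).toNat → 1 ≤ i → N ≤ (Xs.length : Int) → N ≤ (Xi.length : Int) →
    (∀ k : Nat, (k : Int) < N → ∀ c ∈ Xs.getD k [], 48 ≤ c) →
    (∀ k : Nat, i ≤ (k : Int) → (k : Int) < N → 1 ≤ Xi.getD k 0) →
    (PySem.List.pyRange i N 1).foldl pvStepA (Xs, Xi, res)
      = (PySem.List.pyRange i N 1).foldl pvStepB (Xs, Xi, res) := by
  intro m
  induction m with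
  | zero =>
      intro i Xs Xi res hm _ _ _ _ _
      rw [PySem.List.pyRange_one_eq_nil (by omega)]
      rfl
  | succ m ih =>
      intro i Xs Xi res hm hi hXs hXi hchars hposAll
      have hiN : i < N := by omega
      rw [PySem.List.pyRange_one_cons hiN, List.foldl_cons, List.foldl_cons]
      obtain ⟨heq, hlen1, hlen2, hchars', hpos'⟩ :=
        pvStep_main N i Xs Xi res hi hiN hXs hXi hchars hposAll
      rw [← heq]
      exact ih (i + 1) (pvStepA (Xs, Xi, res) i).1 (pvStepA (Xs, Xi, res) i).2.1
        (pvStepA (Xs, Xi, res) i).2.2 (by omega) (by omega)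
        (by rw [hlen1]; exact hXs) (by rw [hlen2]; exact hXi) hchars' hpos'

lemma pvFinal (N : Int) (X_string : List String) (X_int : List Int)
    (hl1 : N ≤ (X_string.length : Int)) (hl2 : N ≤ (X_int.length : Int))
    (hpos : ∀ n ∈ (X_int.take N.toNat).drop 1, 1 ≤ n)
    (hchars : ∀ s ∈ X_string.take N.toNat, ∀ c ∈ s.toList, 48 ≤ c.toNat) :
    minimum_appends N X_string X_int = minimum_appends_alt N X_string X_int := by
  have hcharsInit : ∀ k : Nat, (k : Int) < N →
      ∀ c ∈ (X_string.map (fun s => s.toList.map Char.toNat)).getD k [], 48 ≤ c := by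
    intro k hk c hc
    have hklen : k < X_string.length := by omega
    rw [List.getD_eq_getElem _ _ (by simpa using hklen), List.getElem_map] at hc
    obtain ⟨ch, hch, rfl⟩ := List.mem_map.mp hc
    have hsmem : X_string[k] ∈ X_string.take N.toNat := by
      have hgt : (X_string.take N.toNat)[k]'(by simp; omega) = X_string[k] :=
        List.getElem_take
      exact hgt ▸ List.getElem_mem _
    exact hchars _ hsmem ch hch
  have hposInit : ∀ k : Nat, (1 : Int) ≤ (k : Int) → (k : Int) < N → 1 ≤ X_int.getD k 0 := by
    intro k hk1 hk2
    have hklen : k < X_int.length := by omega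
    have h1 : k - 1 < ((X_int.take N.toNat).drop 1).length := by simp; omega
    have hgt : ((X_int.take N.toNat).drop 1)[k - 1]'h1 = X_int[k]'hklen := by
      rw [List.getElem_drop, List.getElem_take]
      congr 1
      omega
    have := hpos _ (hgt ▸ List.getElem_mem h1)
    rwa [List.getD_eq_getElem _ _ hklen]
  have hloop := pvLoop N ((N - 1).toNat) 1
    (X_string.map (fun s => s.toList.map Char.toNat)) X_int 0 rfl (le_refl 1)
    (by simpa using hl1) hl2 hcharsInit hposInit
  rw [minimum_appends, minimum_appends_alt, hloop]

-- ===== VERDICT (by name: the statement is the Claim_ definition above) =====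
theorem minimum_appends_spec : Claim_equal_minimum_appends := by
  intro N X_string X_int _hdom hpre
  obtain ⟨hl1, hl2, hpos, hchars⟩ := hpre
  show minimum_appends N X_string X_int = minimum_appends_alt N X_string X_int
  exact pvFinal N X_string X_int hl1 hl2 (by simpa using hpos) (by simpa using hchars)
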